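-- pv_equiv track=rewrite | github.com/ZHANGCchi/BFCL_tag | src/labeling/turns.py | split_turns
-- ===== SOURCE A (Python) =====
-- from typing import Any, Dict, List
--
-- def split_turns(messages: List[Dict[str, Any]]) -> List[List[Dict[str, Any]]]:
--     """Split a message list into turn-sized slices using user messages as anchors."""
--     turns: List[List[Dict[str, Any]]] = []
--     current_turn: List[Dict[str, Any]] = []
--     waiting_prefix: List[Dict[str, Any]] = []
--
--     for message in messages:
--         role = message.get("role")
--
--         if role == "user":
--             if current_turn:
--                 turns.append(current_turn)
--                 current_turn = []
--             if waiting_prefix: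
--                 current_turn.extend(waiting_prefix)
--                 waiting_prefix = []
--             current_turn.append(message)
--             continue
--
--         if not current_turn:
--             # Collect non-user content that appears before the next user message.
--             waiting_prefix.append(message)
--             continue
--
--         current_turn.append(message)
--
--     if current_turn:
--         turns.append(current_turn)
--     elif waiting_prefix and not turns:
--         # Degenerate dialogues without explicit user input.
--         turns.append(waiting_prefix)
--
--     return turns
-- ===== SOURCE B (Python) =====
-- from typing import Any, Dict, List
--
-- def split_turns(messages: List[Dict[str, Any]]) -> List[List[Dict[str, Any]]]:
--     """Recursive greedy splitter: each call slices off one complete turn.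
--
--     A turn is the leading non-user prefix, plus the first user message (if any),
--     plus the non-user messages that follow it; recurse on the remainder.
--     """
--     def lead(ms: List[Dict[str, Any]]) -> int:
--         n = 0
--         while n < len(ms) and ms[n].get("role") != "user":
--             n += 1
--         return n
--
--     if not messages:
--         return []
--     j = lead(messages)
--     if j < len(messages):
--         j += 1                      # include the anchoring user message
--         j += lead(messages[j:])     # absorb its non-user follow-ups
--     return [messages[:j]] + split_turns(messages[j:])
-- ===== Notes on version B (the rewrite author's own statement) =====
-- stated objective: alternative
-- what changed: Replaced A's single-pass three-accumulator state machine (turns/current_turn/waiting_prefix with post-loop fixups) by a recursive greedy splitter that slices off one complete turn per call (leading non-user prefix + first user anchor + its non-user follow-ups) and recurses on the rest.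
import Mathlib
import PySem

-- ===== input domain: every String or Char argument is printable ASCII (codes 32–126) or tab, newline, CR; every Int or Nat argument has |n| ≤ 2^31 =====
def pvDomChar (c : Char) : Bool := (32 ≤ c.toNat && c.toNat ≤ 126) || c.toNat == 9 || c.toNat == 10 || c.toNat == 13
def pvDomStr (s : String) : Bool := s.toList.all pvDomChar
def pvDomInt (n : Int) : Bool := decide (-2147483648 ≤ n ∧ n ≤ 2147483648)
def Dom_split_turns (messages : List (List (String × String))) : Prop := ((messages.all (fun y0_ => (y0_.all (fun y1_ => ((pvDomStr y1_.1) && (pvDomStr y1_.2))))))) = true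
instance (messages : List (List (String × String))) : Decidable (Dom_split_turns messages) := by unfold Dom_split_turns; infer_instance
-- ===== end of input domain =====

-- B replaces A's single-pass three-accumulator state machine by a recursive greedy
-- splitter that slices off one complete turn per call (alternative decomposition, same cost).

abbrev Msg : Type := List (String × String)

-- shared helper: message.get("role") == "user"
def isUser (m : Msg) : Bool := (PySem.Dict.mk m).get? "role" == some "user"

-- ===== PORT A =====
-- state = (turns, current_turn, waiting_prefix)
def stepA (st : List (List Msg) × List Msg × List Msg) (m : Msg) :
    List (List Msg) × List Msg × List Msg :=
  let (turns, cur, pre) := st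
  if isUser m then
    let (turns, cur) := if cur ≠ [] then (turns ++ [cur], ([] : List Msg)) else (turns, cur)
    let (cur, pre) := if pre ≠ [] then (cur ++ pre, ([] : List Msg)) else (cur, pre)
    (turns, cur ++ [m], pre)
  else if cur = [] then (turns, cur, pre ++ [m])
  else (turns, cur ++ [m], pre)

-- the post-loop fixups of A
def finishA (st : List (List Msg) × List Msg × List Msg) : List (List Msg) :=
  let (turns, cur, pre) := st
  if cur ≠ [] then turns ++ [cur]
  else if pre ≠ [] ∧ turns = [] then turns ++ [pre]
  else turns

def split_turns (messages : List (List (String × String))) : List (List (List (String × String))) :=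
  finishA (messages.foldl stepA ([], [], []))

-- ===== PORT B =====
-- B's helper `lead`: number of leading non-user messages
def leadCount : List Msg → Nat
  | [] => 0
  | m :: rest => if isUser m then 0 else leadCount rest + 1

theorem leadCount_le (ms : List Msg) : leadCount ms ≤ ms.length := by
  induction ms with
  | nil => simp [leadCount]
  | cons m rest ih => simp only [leadCount, List.length_cons]; split <;> omega

def split_turns_alt (messages : List (List (String × String))) : List (List (List (String × String))) :=
  match messages with
  | [] => []
  | m :: rest =>
    let j0 := leadCount (m :: rest)
    let j := if j0 < (m :: rest).length then (j0 + 1) + leadCount ((m :: rest).drop (j0 + 1)) else j0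
    (m :: rest).take j :: split_turns_alt ((m :: rest).drop j)
termination_by messages.length
decreasing_by
  simp only [List.length_drop, List.length_cons]
  have h1 := leadCount_le (m :: rest)
  simp only [List.length_cons] at h1
  split <;> omega

-- ===== PRECONDITION & SPEC =====
def Spec_split_turns (messages : List (List (String × String))) (out : List (List (List (String × String)))) : Prop := out = split_turns_alt messages
instance (messages : List (List (String × String))) (out : List (List (List (String × String)))) : Decidable (Spec_split_turns messages out) := by unfold Spec_split_turns; infer_instance

-- ===== CLAIM (what is proved, stated in full; the proofs are below) =====
def Claim_equal_split_turns : Prop := ∀ (messages : List (List (String × String))), Dom_split_turns messages → Spec_split_turns messages (split_turns messages)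

-- ===== LEMMAS AND PROOFS =====

theorem alt_nil : split_turns_alt [] = [] := by rw [split_turns_alt]

-- A's loop once current_turn is non-empty, as a recursion
def contChunks (cur : List Msg) : List Msg → List (List Msg)
  | [] => [cur]
  | m :: rest => if isUser m then cur :: contChunks [m] rest else contChunks (cur ++ [m]) rest

-- A's loop while current_turn is empty (waiting_prefix phase)
def preResult (pre : List Msg) : List Msg → List (List Msg)
  | [] => if pre = [] then [] else [pre]
  | m :: rest => if isUser m then contChunks (pre ++ [m]) rest else preResult (pre ++ [m]) rest

theorem foldl_started (ms : List Msg) : ∀ (turns : List (List Msg)) (cur : List Msg), cur ≠ [] →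
    finishA (ms.foldl stepA (turns, cur, [])) = turns ++ contChunks cur ms := by
  induction ms with
  | nil => intro turns cur h; simp [finishA, contChunks, h]
  | cons m rest ih =>
    intro turns cur h
    by_cases hu : isUser m = true
    · have : stepA (turns, cur, []) m = (turns ++ [cur], [m], []) := by
        simp [stepA, hu, h]
      rw [List.foldl_cons, this, ih _ [m] (by simp)]
      simp [contChunks, hu]
    · have : stepA (turns, cur, []) m = (turns, cur ++ [m], []) := by
        simp [stepA, hu, h]
      rw [List.foldl_cons, this, ih _ (cur ++ [m]) (by simp)]
      simp [contChunks, hu]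

theorem foldl_pre (ms : List Msg) : ∀ (pre : List Msg),
    finishA (ms.foldl stepA ([], [], pre)) = preResult pre ms := by
  induction ms with
  | nil =>
    intro pre
    by_cases h : pre = [] <;> simp [finishA, preResult, h]
  | cons m rest ih =>
    intro pre
    by_cases hu : isUser m = true
    · have : stepA ([], [], pre) m = ([], pre ++ [m], []) := by
        by_cases h : pre = [] <;> simp [stepA, hu, h]
      rw [List.foldl_cons, this, foldl_started rest [] (pre ++ [m]) (by simp)]
      simp [preResult, hu]
    · have : stepA ([], [], pre) m = ([], [], pre ++ [m]) := by
        simp [stepA, hu]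
      rw [List.foldl_cons, this, ih (pre ++ [m])]
      simp [preResult, hu]

theorem leadCount_append (pre ms : List Msg) (h : ∀ m ∈ pre, isUser m = false) :
    leadCount (pre ++ ms) = pre.length + leadCount ms := by
  induction pre with
  | nil => simp
  | cons p ps ih =>
    have hp : isUser p = false := h p (by simp)
    simp only [List.cons_append, leadCount, hp, Bool.false_eq_true, if_false, List.length_cons]
    rw [ih (fun m hm => h m (by simp [hm]))]
    omega

theorem contChunks_eq_alt (rest : List Msg) : ∀ (cur : List Msg),
    contChunks cur rest =
      (cur ++ rest.take (leadCount rest)) :: split_turns_alt (rest.drop (leadCount rest)) := by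
  induction rest with
  | nil => intro cur; simp [contChunks, leadCount, alt_nil]
  | cons m rest2 ih =>
    intro cur
    by_cases hu : isUser m = true
    · have halt : split_turns_alt (m :: rest2) =
          (m :: rest2.take (leadCount rest2)) :: split_turns_alt (rest2.drop (leadCount rest2)) := by
        rw [split_turns_alt]
        have hj0 : leadCount (m :: rest2) = 0 := by simp [leadCount, hu]
        have e : 1 + leadCount rest2 = leadCount rest2 + 1 := Nat.add_comm _ _
        simp [hj0, e]
      simp only [contChunks, hu, if_true, leadCount, List.take_zero, List.drop_zero,
        List.append_nil]
      rw [ih [m], halt]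
      simp
    · simp only [contChunks, hu, Bool.false_eq_true, if_false, leadCount, List.take_succ_cons,
        List.drop_succ_cons]
      rw [ih (cur ++ [m])]
      simp

theorem preResult_eq_alt (ms : List Msg) : ∀ (pre : List Msg), (∀ m ∈ pre, isUser m = false) →
    preResult pre ms = split_turns_alt (pre ++ ms) := by
  induction ms with
  | nil =>
    intro pre h
    by_cases hp : pre = []
    · simp [preResult, hp, alt_nil]
    · obtain ⟨p, ps, rfl⟩ := List.exists_cons_of_ne_nil hp
      have hl : leadCount (p :: ps) = (p :: ps).length := by
        have := leadCount_append (p :: ps) [] h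
        simpa using this
      simp only [preResult, if_neg hp, List.append_nil]
      rw [split_turns_alt]
      simp [hl, alt_nil]
  | cons m rest ih =>
    intro pre h
    by_cases hu : isUser m = true
    · have hj0 : leadCount (pre ++ m :: rest) = pre.length := by
        rw [leadCount_append pre (m :: rest) h]; simp [leadCount, hu]
      have hne : pre ++ m :: rest ≠ [] := by simp
      obtain ⟨q, qs, hq⟩ := List.exists_cons_of_ne_nil hne
      have hdrop1 : (pre ++ m :: rest).drop (pre.length + 1) = rest := by
        have : pre ++ m :: rest = (pre ++ [m]) ++ rest := by simp
        rw [this]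
        have : pre.length + 1 = (pre ++ [m]).length := by simp
        rw [this, List.drop_left]
      have htake : (pre ++ m :: rest).take (pre.length + 1 + leadCount rest)
          = pre ++ [m] ++ rest.take (leadCount rest) := by
        have h1 : pre ++ m :: rest = (pre ++ [m]) ++ rest := by simp
        have h2 : pre.length + 1 + leadCount rest = (pre ++ [m]).length + leadCount rest := by simp
        rw [h1, h2, List.take_length_add_append]
      have hdrop : (pre ++ m :: rest).drop (pre.length + 1 + leadCount rest)
          = rest.drop (leadCount rest) := by
        have h1 : pre ++ m :: rest = (pre ++ [m]) ++ rest := by simp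
        have h2 : pre.length + 1 + leadCount rest = (pre ++ [m]).length + leadCount rest := by simp
        rw [h1, h2, List.drop_length_add_append]
      have hlt : pre.length < (pre ++ m :: rest).length := by simp
      conv_rhs => rw [hq, split_turns_alt, ← hq]
      simp only [preResult, hu, if_true]
      rw [contChunks_eq_alt rest (pre ++ [m])]
      rw [← hq] at *
      simp only [hj0, hlt, if_pos, hdrop1, htake, hdrop]
    · have h' : ∀ x ∈ pre ++ [m], isUser x = false := by
        intro x hx
        rcases List.mem_append.mp hx with hx | hx
        · exact h x hx
        · simp at hx; subst hx; simpa using hu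
      simp only [preResult, hu, Bool.false_eq_true, if_false]
      rw [ih (pre ++ [m]) h']
      simp

-- ===== VERDICT (by name: the statement is the Claim_ definition above) =====
theorem split_turns_spec : Claim_equal_split_turns := by
  intro messages _
  unfold Spec_split_turns split_turns
  rw [foldl_pre messages [], preResult_eq_alt messages [] (by simp)]
  simp
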